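-- pv_equiv track=rewrite | github.com/attaccopigmeo/Python- | Седьмая лаба питон/7.py | swap_matrix_elements
-- ===== SOURCE A (Python) =====
-- def swap_matrix_elements(matrix):
--     M = len(matrix)
--     N = len(matrix[0])
--     # Инициализация значений и индексов для максимального и минимального элементов
--     max_value = matrix[0][0]
--     max_pos = (0, 0)
--     min_value = matrix[0][0]
--     min_pos = (0, 0)
--     for i in range(M): # Поиск максимального и минимального элемента
--         for j in range(N):
--             if matrix[i][j] > max_value:
--                 max_value = matrix[i][j]
--                 max_pos = (i, j)
--             if matrix[i][j] < min_value:
--                 min_value = matrix[i][j]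
--                 min_pos = (i, j)
--     # Обмен максимального элемента с первым элементом
--     matrix[max_pos[0]][max_pos[1]], matrix[0][0] = matrix[0][0], matrix[max_pos[0]][max_pos[1]]
--     if min_pos == (0, 0):
--         min_pos = max_pos
--     # Обмен минимального элемента с последним элементом
--     matrix[min_pos[0]][min_pos[1]], matrix[M-1][N-1] = matrix[M-1][N-1], matrix[min_pos[0]][min_pos[1]]
--     return matrix
-- ===== SOURCE B (Python) =====
-- def swap_matrix_elements(matrix):
--     M = len(matrix)
--     N = len(matrix[0])
--     # flatten in row-major order, locate first max / first min by index arithmetic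
--     flat = [matrix[i][j] for i in range(M) for j in range(N)]
--     kmax = flat.index(max(flat))
--     kmin = flat.index(min(flat))
--     max_pos = divmod(kmax, N)
--     min_pos = divmod(kmin, N) if kmin else max_pos
--     matrix[max_pos[0]][max_pos[1]], matrix[0][0] = matrix[0][0], matrix[max_pos[0]][max_pos[1]]
--     matrix[min_pos[0]][min_pos[1]], matrix[M-1][N-1] = matrix[M-1][N-1], matrix[min_pos[0]][min_pos[1]]
--     return matrix
-- ===== Notes on version B (the rewrite author's own statement) =====
-- stated objective: idiomatic
-- what changed: Replaces A's fused nested-loop that hand-tracks four running extremum variables with two builtin reductions over a flattened row-major list (max/min + list.index), recovering coordinates by divmod; the min_pos==(0,0) fix-up collapses to 'if kmin == 0'.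
import Mathlib
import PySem

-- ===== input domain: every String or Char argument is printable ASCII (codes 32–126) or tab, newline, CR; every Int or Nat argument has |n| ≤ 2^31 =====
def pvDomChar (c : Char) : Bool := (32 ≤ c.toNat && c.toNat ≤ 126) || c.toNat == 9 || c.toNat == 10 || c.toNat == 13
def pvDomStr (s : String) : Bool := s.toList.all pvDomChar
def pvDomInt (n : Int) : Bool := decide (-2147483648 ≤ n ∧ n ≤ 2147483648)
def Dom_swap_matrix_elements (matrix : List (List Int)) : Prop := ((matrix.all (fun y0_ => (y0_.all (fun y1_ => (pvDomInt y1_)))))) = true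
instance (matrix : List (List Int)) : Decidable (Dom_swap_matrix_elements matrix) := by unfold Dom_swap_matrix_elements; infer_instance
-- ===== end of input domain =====

-- B replaces A's fused nested-loop extremum tracking with builtin max/min + first-index over the
-- flattened matrix (idiomatic decomposition, same cost). A mutates its argument in place; B performs
-- the same two swaps in place; the equivalence proved here is about the RETURN value.

-- shared helpers: reading / writing a cell, and the simultaneous-assignment swap both Pythons
-- perform with identical statements (m[p], m[q] = m[q], m[p]: read both, write p then q)
def pvMget (m : List (List Int)) (i j : Nat) : Int := (m.getD i []).getD j 0
def pvSetm (m : List (List Int)) (i j : Nat) (v : Int) : List (List Int) :=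
  m.set i ((m.getD i []).set j v)
def pvSwap (m : List (List Int)) (p q : Nat × Nat) : List (List Int) :=
  let a := pvMget m p.1 p.2
  let b := pvMget m q.1 q.2
  pvSetm (pvSetm m p.1 p.2 b) q.1 q.2 a

-- ===== PORT A =====
def swap_matrix_elements (matrix : List (List Int)) : List (List Int) :=
  let M := matrix.length
  let N := (matrix.getD 0 []).length
  let v00 := pvMget matrix 0 0
  let st := (List.range M).foldl (fun st i =>
      (List.range N).foldl (fun st j =>
        ((if pvMget matrix i j > st.1.1 then (pvMget matrix i j, (i, j)) else st.1),
         (if pvMget matrix i j < st.2.1 then (pvMget matrix i j, (i, j)) else st.2))) st)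
    ((v00, ((0 : Nat), (0 : Nat))), (v00, ((0 : Nat), (0 : Nat))))
  let maxPos := st.1.2
  let minPos0 := st.2.2
  let m1 := pvSwap matrix maxPos (0, 0)
  let minPos := if minPos0 = ((0 : Nat), (0 : Nat)) then maxPos else minPos0
  pvSwap m1 minPos (M - 1, N - 1)

-- ===== PORT B =====
def swap_matrix_elements_alt (matrix : List (List Int)) : List (List Int) :=
  let M := matrix.length
  let N := (matrix.getD 0 []).length
  let flat := (List.range M).flatMap (fun i => (List.range N).map (fun j => pvMget matrix i j))
  let kmax := (PySem.List.index? flat ((PySem.List.max? flat (fun y => y)).getD 0)).getD 0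
  let kmin := (PySem.List.index? flat ((PySem.List.min? flat (fun y => y)).getD 0)).getD 0
  let maxPos := (kmax / N, kmax % N)
  let minPos := if kmin = 0 then maxPos else (kmin / N, kmin % N)
  let m1 := pvSwap matrix maxPos (0, 0)
  pvSwap m1 minPos (M - 1, N - 1)

-- ===== PRECONDITION & SPEC =====
-- Pre_: A raises IndexError on an empty matrix, on an empty first row, and on a ragged matrix
-- whose later rows are shorter than the first (matrix[i][j] or matrix[M-1][N-1] out of range).
def Pre_swap_matrix_elements (matrix : List (List Int)) : Prop :=
  matrix ≠ [] ∧ 0 < (matrix.getD 0 []).length ∧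
    ∀ row ∈ matrix, (matrix.getD 0 []).length ≤ row.length
instance (matrix : List (List Int)) : Decidable (Pre_swap_matrix_elements matrix) := by
  unfold Pre_swap_matrix_elements; infer_instance
def pvWitness_swap_matrix_elements : List (List Int) := [[1, 2], [3, 4]]

def Spec_swap_matrix_elements (matrix : List (List Int)) (out : List (List Int)) : Prop := out = swap_matrix_elements_alt matrix
instance (matrix : List (List Int)) (out : List (List Int)) : Decidable (Spec_swap_matrix_elements matrix out) := by unfold Spec_swap_matrix_elements; infer_instance

-- ===== CLAIM (what is proved, stated in full; the proofs are below) =====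
def Claim_equal_swap_matrix_elements : Prop := ∀ (matrix : List (List Int)), Dom_swap_matrix_elements matrix → Pre_swap_matrix_elements matrix → Spec_swap_matrix_elements matrix (swap_matrix_elements matrix)

-- ===== LEMMAS AND PROOFS =====

-- flattening a row-major double comprehension into a single range
lemma pvFL {α : Type} (N : Nat) (h : Nat → Nat → α) :
    ∀ M : Nat, (List.range M).flatMap (fun i => (List.range N).map (fun j => h i j))
      = (List.range (M * N)).map (fun k => h (k / N) (k % N)) := by
  intro M
  induction M with
  | zero => simp
  | succ M ih =>
      rcases Nat.eq_zero_or_pos N with hN | hN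
      · subst hN; simp
      · rw [List.range_succ, List.flatMap_append, ih, Nat.succ_mul, List.range_add,
            List.map_append, List.map_map]
        simp only [List.flatMap_cons, List.flatMap_nil, List.append_nil]
        congr 1
        apply List.map_congr_left
        intro j hj
        have hj' : j < N := List.mem_range.mp hj
        have h1 : (M * N + j) / N = M := by
          rw [Nat.mul_comm, Nat.mul_add_div hN]; simp [Nat.div_eq_of_lt hj']
        have h2 : (M * N + j) % N = j := by
          rw [Nat.mul_comm, Nat.mul_add_mod, Nat.mod_eq_of_lt hj']
        simp [Function.comp, h1, h2]

-- a fold whose step ignores its input index leaves the state unchanged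
lemma pvFoldConst {σ : Type} : ∀ (l : List Nat) (init : σ),
    l.foldl (fun st _ => st) init = init := by
  intro l
  induction l with
  | nil => intro init; rfl
  | cons x t ih => intro init; simp [ih init]

-- a nested fold over two ranges is a fold over the flat range
lemma pvNested {σ : Type} (N : Nat) (f : σ → Nat → Nat → σ) :
    ∀ (M : Nat) (init : σ),
      (List.range M).foldl (fun st i => (List.range N).foldl (fun st j => f st i j) st) init
        = (List.range (M * N)).foldl (fun st k => f st (k / N) (k % N)) init := by
  intro M
  induction M with
  | zero => intro init; simp
  | succ M ih =>
      intro init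
      rcases Nat.eq_zero_or_pos N with hN | hN
      · subst hN
        simp only [List.range_zero, List.foldl_nil, Nat.mul_zero]
        exact (pvFoldConst (List.range (M + 1)) init)
      · rw [List.range_succ, List.foldl_append, ih, Nat.succ_mul, List.range_add,
            List.foldl_append, List.foldl_map]
        simp only [List.foldl_cons, List.foldl_nil]
        apply PySem.List.foldl_congr_mem
        intro st j hj
        have hj' : j < N := List.mem_range.mp hj
        have h1 : (M * N + j) / N = M := by
          rw [Nat.mul_comm, Nat.mul_add_div hN]; simp [Nat.div_eq_of_lt hj']
        have h2 : (M * N + j) % N = j := by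
          rw [Nat.mul_comm, Nat.mul_add_mod, Nat.mod_eq_of_lt hj']
        rw [h1, h2]

-- a fold with componentwise state is the pair of the component folds
lemma pvPair {α β γ : Type} (g : β → α → β) (h : γ → α → γ) :
    ∀ (l : List α) (a : β) (b : γ),
      l.foldl (fun st x => (g st.1 x, h st.2 x)) (a, b) = (l.foldl g a, l.foldl h b) := by
  intro l
  induction l with
  | nil => intro a b; simp
  | cons x t ih => intro a b; simp [ih]

-- the position component is inert: tracking pos k instead of k commutes with any pos map
lemma pvPosMap {β : Type} (vals : Nat → Int) (pos : Nat → β) (P : Int → Int → Prop)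
    [DecidableRel P] :
    ∀ (l : List Nat) (v0 : Int) (k0 : Nat),
      l.foldl (fun st k => if P (vals k) st.1 then (vals k, pos k) else st) (v0, pos k0)
        = (((l.foldl (fun st k => if P (vals k) st.1 then (vals k, k) else st) (v0, k0)).1),
           pos ((l.foldl (fun st k => if P (vals k) st.1 then (vals k, k) else st) (v0, k0)).2)) := by
  intro l
  induction l with
  | nil => intro v0 k0; simp
  | cons x t ih =>
      intro v0 k0
      simp only [List.foldl_cons]
      by_cases hP : P (vals x) v0
      · simp only [hP, if_pos]; exact ih (vals x) x
      · simp only [hP, if_neg, not_false_iff]; exact ih v0 k0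

-- running max with first-index, over a consecutive block of indices
lemma pvMaxSpec (vals : Nat → Int) :
    ∀ (n a : Nat) (v0 : Int) (k0 : Nat),
      (List.range' a n).foldl (fun st k => if vals k > st.1 then (vals k, k) else st) (v0, k0)
        = (((List.range' a n).map vals).foldl max v0,
           if ((List.range' a n).map vals).foldl max v0 = v0 then k0
           else a + (PySem.List.index? ((List.range' a n).map vals)
                      (((List.range' a n).map vals).foldl max v0)).getD 0) := by
  intro n
  induction n with
  | zero => intro a v0 k0; simp
  | succ n ih =>
      intro a v0 k0
      rw [List.range'_succ]
      simp only [List.foldl_cons, List.map_cons]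
      by_cases hv : vals a > v0
      · rw [if_pos hv, ih (a + 1) (vals a) a]
        have hmax : max v0 (vals a) = vals a := max_eq_right (le_of_lt hv)
        set R := (List.range' (a + 1) n).map vals with hR
        have hMx : R.foldl max (vals a) ≥ vals a := (PySem.List.le_foldl_max R (vals a)).1
        have hne : R.foldl max (vals a) ≠ v0 := by
          intro h; rw [h] at hMx; exact absurd hMx (not_le.mpr hv)
        rw [hmax, if_neg hne]
        by_cases he : R.foldl max (vals a) = vals a
        · rw [if_pos he, he, PySem.List.index?_cons_self]
          simp
        · rw [if_neg he]
          have hmem : R.foldl max (vals a) ∈ R := by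
            rcases PySem.List.foldl_max_mem R (vals a) with h | h
            · exact absurd h he
            · exact h
          obtain ⟨j, hj⟩ := Option.isSome_iff_exists.mp
            ((PySem.List.index?_isSome_iff _ _).mpr hmem)
          have hne2 : vals a ≠ List.foldl max (vals a) R := fun h => he (Eq.symm h)
          rw [PySem.List.index?_cons_of_ne R hne2, hj]
          simp
          omega
      · rw [if_neg hv]
        rw [ih (a + 1) v0 k0]
        have hmax : max v0 (vals a) = v0 := max_eq_left (not_lt.1 hv)
        set R := (List.range' (a + 1) n).map vals with hR
        rw [hmax]
        by_cases he : R.foldl max v0 = v0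
        · rw [if_pos he, if_pos he]
        · rw [if_neg he, if_neg he]
          have hgt : v0 < R.foldl max v0 :=
            lt_of_le_of_ne (PySem.List.le_foldl_max R v0).1 (fun h => he h.symm)
          have hne' : vals a ≠ R.foldl max v0 := by
            intro h; rw [← h] at hgt; exact hv hgt
          have hmem : R.foldl max v0 ∈ R := by
            rcases PySem.List.foldl_max_mem R v0 with h | h
            · exact absurd h he
            · exact h
          obtain ⟨j, hj⟩ := Option.isSome_iff_exists.mp
            ((PySem.List.index?_isSome_iff _ _).mpr hmem)
          rw [PySem.List.index?_cons_of_ne R hne', hj]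
          simp
          omega

lemma pvMinSpec (vals : Nat → Int) :
    ∀ (n a : Nat) (v0 : Int) (k0 : Nat),
      (List.range' a n).foldl (fun st k => if vals k < st.1 then (vals k, k) else st) (v0, k0)
        = (((List.range' a n).map vals).foldl min v0,
           if ((List.range' a n).map vals).foldl min v0 = v0 then k0
           else a + (PySem.List.index? ((List.range' a n).map vals)
                      (((List.range' a n).map vals).foldl min v0)).getD 0) := by
  intro n
  induction n with
  | zero => intro a v0 k0; simp
  | succ n ih =>
      intro a v0 k0
      rw [List.range'_succ]
      simp only [List.foldl_cons, List.map_cons]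
      by_cases hv : vals a < v0
      · rw [if_pos hv, ih (a + 1) (vals a) a]
        have hmax : min v0 (vals a) = vals a := min_eq_right (le_of_lt hv)
        set R := (List.range' (a + 1) n).map vals with hR
        have hMx : R.foldl min (vals a) ≤ vals a := (PySem.List.foldl_min_le R (vals a)).1
        have hne : R.foldl min (vals a) ≠ v0 := by
          intro h; rw [h] at hMx; exact absurd hMx (not_le.mpr hv)
        rw [hmax, if_neg hne]
        by_cases he : R.foldl min (vals a) = vals a
        · rw [if_pos he, he, PySem.List.index?_cons_self]
          simp
        · rw [if_neg he]
          have hmem : R.foldl min (vals a) ∈ R := by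
            rcases PySem.List.foldl_min_mem R (vals a) with h | h
            · exact absurd h he
            · exact h
          obtain ⟨j, hj⟩ := Option.isSome_iff_exists.mp
            ((PySem.List.index?_isSome_iff _ _).mpr hmem)
          have hne2 : vals a ≠ List.foldl min (vals a) R := fun h => he (Eq.symm h)
          rw [PySem.List.index?_cons_of_ne R hne2, hj]
          simp
          omega
      · rw [if_neg hv]
        rw [ih (a + 1) v0 k0]
        have hmax : min v0 (vals a) = v0 := min_eq_left (not_lt.1 hv)
        set R := (List.range' (a + 1) n).map vals with hR
        rw [hmax]
        by_cases he : R.foldl min v0 = v0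
        · rw [if_pos he, if_pos he]
        · rw [if_neg he, if_neg he]
          have hgt : R.foldl min v0 < v0 :=
            lt_of_le_of_ne (PySem.List.foldl_min_le R v0).1 he
          have hne' : vals a ≠ R.foldl min v0 := by
            intro h; rw [← h] at hgt; exact hv hgt
          have hmem : R.foldl min v0 ∈ R := by
            rcases PySem.List.foldl_min_mem R v0 with h | h
            · exact absurd h he
            · exact h
          obtain ⟨j, hj⟩ := Option.isSome_iff_exists.mp
            ((PySem.List.index?_isSome_iff _ _).mpr hmem)
          rw [PySem.List.index?_cons_of_ne R hne', hj]
          simp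
          omega

-- abbreviations for B's flat.index(max(flat)) / flat.index(min(flat)) values
def pvKmax (K : Nat) (vals : Nat → Int) : Nat :=
  (PySem.List.index? ((List.range K).map vals)
    ((PySem.List.max? ((List.range K).map vals) (fun y => y)).getD 0)).getD 0
def pvKmin (K : Nat) (vals : Nat → Int) : Nat :=
  (PySem.List.index? ((List.range K).map vals)
    ((PySem.List.min? ((List.range K).map vals) (fun y => y)).getD 0)).getD 0

-- A's first-max index equals B's flat.index(max(flat)) computation
lemma pvMaxIdx (K : Nat) (vals : Nat → Int) :
    ((List.range K).foldl (fun st k => if vals k > st.1 then (vals k, k) else st) (vals 0, 0)).2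
      = pvKmax K vals := by
  cases K with
  | zero => simp [pvKmax, PySem.List.index?_eq_idxOf?]
  | succ n =>
      rw [List.range_eq_range', pvMaxSpec vals (n + 1) 0 (vals 0) 0]
      unfold pvKmax
      rw [List.range_eq_range', List.range'_succ]
      simp only [List.map_cons, List.foldl_cons, max_self, PySem.List.max?_id_cons,
        Option.getD_some, zero_add]
      by_cases he : ((List.range' 1 n).map vals).foldl max (vals 0) = vals 0
      · rw [if_pos he, he, PySem.List.index?_cons_self]
        simp
      · rw [if_neg he]

lemma pvMinIdx (K : Nat) (vals : Nat → Int) :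
    ((List.range K).foldl (fun st k => if vals k < st.1 then (vals k, k) else st) (vals 0, 0)).2
      = pvKmin K vals := by
  cases K with
  | zero => simp [pvKmin, PySem.List.index?_eq_idxOf?]
  | succ n =>
      rw [List.range_eq_range', pvMinSpec vals (n + 1) 0 (vals 0) 0]
      unfold pvKmin
      rw [List.range_eq_range', List.range'_succ]
      simp only [List.map_cons, List.foldl_cons, min_self, PySem.List.min?_id_cons,
        Option.getD_some, zero_add]
      by_cases he : ((List.range' 1 n).map vals).foldl min (vals 0) = vals 0
      · rw [if_pos he, he, PySem.List.index?_cons_self]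
        simp
      · rw [if_neg he]

-- the two position components of A's fused fold, in B's terms
lemma pvState1 (N M : Nat) (vals : Nat → Int) :
    ((List.range (M * N)).foldl (fun st k =>
        ((if vals k > st.1.1 then (vals k, (k / N, k % N)) else st.1),
         (if vals k < st.2.1 then (vals k, (k / N, k % N)) else st.2)))
      ((vals 0, ((0 : Nat), (0 : Nat))), (vals 0, ((0 : Nat), (0 : Nat))))).1.2
      = (pvKmax (M * N) vals / N, pvKmax (M * N) vals % N) := by
  have h0 : (((0 : Nat), (0 : Nat)) : Nat × Nat) = ((0 : Nat) / N, (0 : Nat) % N) := by simp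
  rw [h0,
    pvPair (fun a k => if vals k > a.1 then (vals k, (k / N, k % N)) else a)
           (fun a k => if vals k < a.1 then (vals k, (k / N, k % N)) else a),
    pvPosMap vals (fun k => (k / N, k % N)) (fun v w => v > w) (List.range (M * N)) (vals 0) 0,
    pvMaxIdx (M * N) vals]

lemma pvState2 (N M : Nat) (vals : Nat → Int) :
    ((List.range (M * N)).foldl (fun st k =>
        ((if vals k > st.1.1 then (vals k, (k / N, k % N)) else st.1),
         (if vals k < st.2.1 then (vals k, (k / N, k % N)) else st.2)))
      ((vals 0, ((0 : Nat), (0 : Nat))), (vals 0, ((0 : Nat), (0 : Nat))))).2.2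
      = (pvKmin (M * N) vals / N, pvKmin (M * N) vals % N) := by
  have h0 : (((0 : Nat), (0 : Nat)) : Nat × Nat) = ((0 : Nat) / N, (0 : Nat) % N) := by simp
  rw [h0,
    pvPair (fun a k => if vals k > a.1 then (vals k, (k / N, k % N)) else a)
           (fun a k => if vals k < a.1 then (vals k, (k / N, k % N)) else a),
    pvPosMap vals (fun k => (k / N, k % N)) (fun v w => v < w) (List.range (M * N)) (vals 0) 0,
    pvMinIdx (M * N) vals]

lemma pvZeroIff (N k : Nat) : (((k / N, k % N) : Nat × Nat) = ((0 : Nat), (0 : Nat))) ↔ k = 0 := by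
  constructor
  · intro h
    have h1 : k / N = 0 := congrArg Prod.fst h
    have h2 : k % N = 0 := congrArg Prod.snd h
    have h3 := Nat.div_add_mod k N
    rw [h1, h2] at h3
    simpa using h3.symm
  · rintro rfl; simp

lemma pvMain (matrix : List (List Int)) :
    swap_matrix_elements matrix = swap_matrix_elements_alt matrix := by
  simp only [swap_matrix_elements, swap_matrix_elements_alt]
  rw [pvFL ((matrix.getD 0 []).length) (fun i j => pvMget matrix i j) matrix.length]
  rw [pvNested ((matrix.getD 0 []).length)
      (fun st i j =>
        ((if pvMget matrix i j > st.1.1 then (pvMget matrix i j, (i, j)) else st.1),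
         (if pvMget matrix i j < st.2.1 then (pvMget matrix i j, (i, j)) else st.2)))
      matrix.length]
  have hv0 : pvMget matrix 0 0
      = pvMget matrix (0 / (matrix.getD 0 []).length) (0 % (matrix.getD 0 []).length) := by simp
  rw [hv0,
    pvState1 ((matrix.getD 0 []).length) matrix.length
      (fun k => pvMget matrix (k / (matrix.getD 0 []).length) (k % (matrix.getD 0 []).length)),
    pvState2 ((matrix.getD 0 []).length) matrix.length
      (fun k => pvMget matrix (k / (matrix.getD 0 []).length) (k % (matrix.getD 0 []).length))]
  simp only [pvKmax, pvKmin]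
  rw [if_congr (pvZeroIff _ _) rfl rfl]

-- ===== VERDICT (by name: the statement is the Claim_ definition above) =====
theorem swap_matrix_elements_spec : Claim_equal_swap_matrix_elements := by
  intro matrix _ _
  unfold Spec_swap_matrix_elements
  exact pvMain matrix
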